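-- pv_equiv track=rewrite | github.com/mmayers12/n15_mice | scripts/analysis/taxonomy.py | fasta_to_organism_refseq
-- ===== SOURCE A (Python) =====
-- def fasta_to_organism_refseq(fasta_defline):
--     '''
--     refseq defline are retarded and have no standardized way of noting organism with square brackets
--     testers:
--     string = "[GSEE] tandem repeats [Invertebrate iridescent virus 30]"
--     string = "coat protein [Euphorbia mosaic virus - A [Mexico:Yucatan:2004]]" #pID: 745
--     string = "[citrate [pro-3S]-lyase] ligase [Vibrio cholerae]"
--     '''
--     # If there are 8 pipes (coming from fasta file)
--     if fasta_defline.count('|') == 8: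
--         # Split defline by '|'. Take the 6th
--         txt = fasta_defline.split('|')[6].strip()
--     elif fasta_defline.count('|') == 4:
--         txt = fasta_defline.split('|')[-1].strip()
--     else:
--         txt = fasta_defline
--
--     brackets = list(parse_brackets(txt))
--     if not brackets:
--         #logger.warn('Malformed defline: ' + fasta_defline)
--         try:     # Just return whatever is between the last '[' and the last ']'
--             txt_flip = txt[::-1]
--             organism = txt_flip[txt_flip.find(']')+1:txt_flip.find('[')][::-1]
--             if len(organism) > 4:
--                 return organism
--             else:
--                 return None
--         except Exception:
--             return None
--
--     # if there are nested brackets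
--     if max(list(zip(*brackets))[0]) > 0:
--         # take the string at level 0
--         organism = [x[1] for x in brackets if x[0] == 0]
--         if len(organism) > 1:
--             # take the last bracket at level 0
--             #logger.warn('Confusing defline: ' + fasta_defline)
--             return organism[-1]
--         else:
--             return organism[0]
--     else:
--         # there are no nested brackets
--         # take the last brackets
--         return brackets[-1][1]
--
-- def parse_brackets(string):
--     """Generate parenthesized contents in string as pairs (level, contents).
--     http://stackoverflow.com/questions/4284991/parsing-nested-parentheses-in-python-grab-content-by-level
--     """
--     if string.count('[') != string.count(']'):
--         return None
--
--     stack = []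
--     for i, c in enumerate(string):
--         if c == '[':
--             stack.append(i)
--         elif c == ']' and stack:
--             start = stack.pop()
--             yield (len(stack), string[start + 1: i])
-- ===== SOURCE B (Python) =====
-- def fasta_to_organism_refseq(fasta_defline):
--     # One left-to-right depth-counter scan over txt instead of parse_brackets + zip/max/filter.
--     if fasta_defline.count('|') == 8:
--         txt = fasta_defline.split('|')[6].strip()
--     elif fasta_defline.count('|') == 4:
--         txt = fasta_defline.split('|')[-1].strip()
--     else:
--         txt = fasta_defline
--
--     last = None
--     if txt.count('[') == txt.count(']'):
--         depth = 0
--         start = 0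
--         for i, c in enumerate(txt):
--             if c == '[':
--                 if depth == 0:
--                     start = i
--                 depth += 1
--             elif c == ']' and depth > 0:
--                 depth -= 1
--                 if depth == 0:
--                     last = txt[start + 1:i]
--     if last is not None:
--         return last
--
--     # fallback: whatever is between the last '[' and the last ']'
--     txt_flip = txt[::-1]
--     organism = txt_flip[txt_flip.find(']') + 1:txt_flip.find('[')][::-1]
--     if len(organism) > 4:
--         return organism
--     return None
-- ===== Notes on version B (the rewrite author's own statement) =====
-- stated objective: simpler
-- what changed: Replaces A's parse_brackets generator (index stack, list of (level, contents) pairs) plus zip/max/filter/len-dispatch postprocessing by one left-to-right depth-counter scan that directly remembers the last bracket group closing at depth 0, since that is what A returns in every non-fallback branch.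
-- crash fix: When txt's opening- and closing-bracket counts are equal and some bracket pair matches but none closes at nesting depth zero, A raises IndexError on organism[0]; B runs the common fallback there and returns None at the witness. — e.g. on fasta_to_organism_refseq("][[a]"): A raises IndexError, B returns none
import Mathlib
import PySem

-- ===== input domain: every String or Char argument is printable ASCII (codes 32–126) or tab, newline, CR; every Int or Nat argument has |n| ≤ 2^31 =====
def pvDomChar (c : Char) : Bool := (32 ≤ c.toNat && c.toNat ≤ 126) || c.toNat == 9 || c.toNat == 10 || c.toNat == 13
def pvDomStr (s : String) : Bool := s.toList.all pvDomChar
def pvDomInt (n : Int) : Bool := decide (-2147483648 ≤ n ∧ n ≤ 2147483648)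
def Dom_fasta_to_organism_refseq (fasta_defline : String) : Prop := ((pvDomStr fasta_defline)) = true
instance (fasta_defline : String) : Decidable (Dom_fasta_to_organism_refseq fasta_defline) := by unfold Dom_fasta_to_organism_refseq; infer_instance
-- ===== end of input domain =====

-- B replaces A's parse_brackets + zip/max/filter machinery by a single left-to-right
-- depth-counter scan that records the last depth-0 bracket (objective: simpler).

-- Helpers shared verbatim by both Pythons (pipe-count prefix, bracket contents, fallback block):

-- txt selection by pipe count (identical first lines of A and B).
-- With 8 (resp. 4) pipes the split has 9 (resp. 5) parts, so the [6] / [-1] lookups never raise;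
-- `.getD ""` is unreachable.
def pvTxt (fasta_defline : String) : String :=
  if PySem.Str.count fasta_defline "|" = 8 then
    PySem.Str.strip ((PySem.List.pyGet? ((PySem.Str.split? fasta_defline "|").getD []) 6).getD "")
  else if PySem.Str.count fasta_defline "|" = 4 then
    PySem.Str.strip ((PySem.List.pyGet? ((PySem.Str.split? fasta_defline "|").getD []) (-1)).getD "")
  else fasta_defline

-- string[start + 1 : i]  (the bracket contents both Pythons slice out)
def pvContent (s : String) (start i : Int) : String :=
  String.ofList (PySem.List.slice s.toList (some (start + 1)) (some i))

-- the fallback block, verbatim in both Pythons: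
--   txt_flip = txt[::-1]; organism = txt_flip[txt_flip.find(']')+1:txt_flip.find('[')][::-1]
--   return organism if len(organism) > 4 else None
-- (s[::-1] = slice with step -1; the try/except in A is dead code — nothing here raises)
def pvFallback (txt : String) : Option String :=
  let txt_flip := (PySem.List.slice? txt.toList none none (-1)).getD []
  let organism := (PySem.List.slice? (PySem.List.slice txt_flip
      (some (PySem.Chars.find txt_flip [']'] + 1)) (some (PySem.Chars.find txt_flip ['[']))) none none (-1)).getD []
  if organism.length > 4 then some (String.ofList organism) else none

-- ===== PORT A =====
-- one step of parse_brackets' loop: push index on '[', on ']' pop (if the stack is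
-- nonempty) and yield (len(stack), string[start+1:i])
def pvStepA (s : String) (st : List Int × List (Nat × String)) (ic : Int × Char) :
    List Int × List (Nat × String) :=
  if ic.2 = '[' then (ic.1 :: st.1, st.2)
  else if ic.2 = ']' then
    match st.1 with
    | [] => st
    | start :: rest => (rest, st.2 ++ [(rest.length, pvContent s start ic.1)])
  else st

-- list(parse_brackets(s)): `return None` in the generator yields the empty list
def pvParseBrackets (s : String) : List (Nat × String) :=
  if PySem.Str.count s "[" ≠ PySem.Str.count s "]" then []
  else ((PySem.List.enumerate s.toList).foldl (pvStepA s) ([], [])).2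

def fasta_to_organism_refseq (fasta_defline : String) : Option String :=
  let txt := pvTxt fasta_defline
  let brackets := pvParseBrackets txt
  if brackets.isEmpty then pvFallback txt
  else
    -- max(list(zip(*brackets))[0]): max of the levels (brackets is nonempty here, so some)
    if (PySem.List.max? (brackets.map Prod.fst) id).getD 0 > 0 then
      let organism := (brackets.filter (fun x => x.1 == 0)).map Prod.snd
      if organism.length > 1 then PySem.List.pyGet? organism (-1)   -- organism[-1]
      else PySem.List.pyGet? organism 0                             -- organism[0] (none = A's IndexError)
    else (PySem.List.pyGet? brackets (-1)).map Prod.snd             -- brackets[-1][1]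

-- ===== PORT B =====
-- one step of B's scan: state (depth, start-of-current-top-level-bracket, last top-level contents)
def pvStepB (s : String) (st : Nat × Int × Option String) (ic : Int × Char) :
    Nat × Int × Option String :=
  if ic.2 = '[' then (st.1 + 1, (if st.1 = 0 then ic.1 else st.2.1), st.2.2)
  else if ic.2 = ']' then
    if 0 < st.1 then
      (st.1 - 1, st.2.1, if st.1 = 1 then some (pvContent s st.2.1 ic.1) else st.2.2)
    else st
  else st

def fasta_to_organism_refseq_alt (fasta_defline : String) : Option String :=
  let txt := pvTxt fasta_defline
  let last : Option String :=
    if PySem.Str.count txt "[" = PySem.Str.count txt "]" then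
      ((PySem.List.enumerate txt.toList).foldl (pvStepB txt) (0, 0, none)).2.2
    else none
  match last with
  | some o => some o
  | none => pvFallback txt

-- ===== PRECONDITION & SPEC =====
-- Pre_ excludes exactly the inputs on which A raises IndexError (`organism[0]` on an empty
-- list): txt has matched '['..']' pairs (so brackets is nonempty) but none of them closes at
-- nesting depth 0. The depth scan below merely states that property of the string; B returns
-- None there via the fallback.
def pvStepS (st : Nat × Bool × Bool) (c : Char) : Nat × Bool × Bool :=
  if c = '[' then (st.1 + 1, st.2)
  else if c = ']' then
    if 0 < st.1 then (st.1 - 1, true, st.2.2 || (st.1 == 1)) else st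
  else st

-- (depth, some pair matched, some pair matched at depth 0)
def pvScan (s : String) : Nat × Bool × Bool := s.toList.foldl pvStepS (0, false, false)

def Pre_fasta_to_organism_refseq (fasta_defline : String) : Prop :=
  PySem.Str.count (pvTxt fasta_defline) "[" ≠ PySem.Str.count (pvTxt fasta_defline) "]"
  ∨ (pvScan (pvTxt fasta_defline)).2.1 = false
  ∨ (pvScan (pvTxt fasta_defline)).2.2 = true
instance (fasta_defline : String) : Decidable (Pre_fasta_to_organism_refseq fasta_defline) := by
  unfold Pre_fasta_to_organism_refseq; infer_instance

def pvWitness_fasta_to_organism_refseq : String := "coat protein [Euphorbia mosaic virus [MX]]"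

-- A raises IndexError when txt's bracket counts are equal and some pair matches but none at
-- depth 0 (e.g. "][[a]"); B returns the fallback value there (None at the witness).
def Raises_fasta_to_organism_refseq (fasta_defline : String) : Prop :=
  PySem.Str.count (pvTxt fasta_defline) "[" = PySem.Str.count (pvTxt fasta_defline) "]"
  ∧ (pvScan (pvTxt fasta_defline)).2.1 = true
  ∧ (pvScan (pvTxt fasta_defline)).2.2 = false
instance (fasta_defline : String) : Decidable (Raises_fasta_to_organism_refseq fasta_defline) := by
  unfold Raises_fasta_to_organism_refseq; infer_instance

def pvRaiseWitness_fasta_to_organism_refseq : String := "][[a]"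
def pvRaiseWitnessOut_fasta_to_organism_refseq : Option String := none

def Spec_fasta_to_organism_refseq (fasta_defline : String) (out : Option String) : Prop :=
  out = fasta_to_organism_refseq_alt fasta_defline
instance (fasta_defline : String) (out : Option String) :
    Decidable (Spec_fasta_to_organism_refseq fasta_defline out) := by
  unfold Spec_fasta_to_organism_refseq; infer_instance

-- ===== CLAIM =====
def Claim_equal_fasta_to_organism_refseq : Prop :=
  ∀ (fasta_defline : String), Dom_fasta_to_organism_refseq fasta_defline →
    Pre_fasta_to_organism_refseq fasta_defline →
    Spec_fasta_to_organism_refseq fasta_defline (fasta_to_organism_refseq fasta_defline)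

def Claim_raises_fasta_to_organism_refseq : Prop :=
  (∀ (fasta_defline : String), Dom_fasta_to_organism_refseq fasta_defline →
    Raises_fasta_to_organism_refseq fasta_defline → ¬ Pre_fasta_to_organism_refseq fasta_defline)
  ∧ (Dom_fasta_to_organism_refseq (pvRaiseWitness_fasta_to_organism_refseq)
    ∧ Raises_fasta_to_organism_refseq (pvRaiseWitness_fasta_to_organism_refseq)
    ∧ fasta_to_organism_refseq_alt (pvRaiseWitness_fasta_to_organism_refseq)
        = pvRaiseWitnessOut_fasta_to_organism_refseq)

-- ===== LEMMAS AND PROOFS =====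

-- Joint loop invariant for the three folds (A's stack loop, B's depth scan, Pre_'s scan):
-- B's depth is A's stack length, B's start is the bottom of A's stack, B's `last` is the
-- last level-0 yield of A, and the scan's two flags say whether A yielded at all / at level 0.
theorem pvInv (s : String) (l : List (Int × Char)) (stack : List Int)
    (out : List (Nat × String)) (start : Int)
    (h2 : ∀ b, stack.getLast? = some b → b = start) :
    (l.foldl (pvStepB s)
        (stack.length, start, ((out.filter (fun p => p.1 == 0)).getLast?).map Prod.snd)).2.2
      = (((l.foldl (pvStepA s) (stack, out)).2.filter (fun p => p.1 == 0)).getLast?).map Prod.snd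
    ∧ ((l.map Prod.snd).foldl pvStepS
        (stack.length, !out.isEmpty, !(out.filter (fun p => p.1 == 0)).isEmpty)).2
      = (!(l.foldl (pvStepA s) (stack, out)).2.isEmpty,
         !((l.foldl (pvStepA s) (stack, out)).2.filter (fun p => p.1 == 0)).isEmpty) := by
  induction l generalizing stack out start with
  | nil => exact ⟨rfl, rfl⟩
  | cons ic l ih =>
    obtain ⟨i, c⟩ := ic
    simp only [List.foldl_cons, List.map_cons]
    by_cases hc1 : c = '['
    · -- push
      have hstep : pvStepA s (stack, out) (i, c) = (i :: stack, out) := by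
        simp [pvStepA, hc1]
      have hstepB : pvStepB s (stack.length, start,
          ((out.filter (fun p => p.1 == 0)).getLast?).map Prod.snd) (i, c)
          = ((i :: stack).length, (if stack.length = 0 then i else start),
             ((out.filter (fun p => p.1 == 0)).getLast?).map Prod.snd) := by
        simp [pvStepB, hc1]
      have hstepS : pvStepS (stack.length, !out.isEmpty,
          !(out.filter (fun p => p.1 == 0)).isEmpty) c
          = ((i :: stack).length, !out.isEmpty,
             !(out.filter (fun p => p.1 == 0)).isEmpty) := by
        simp [pvStepS, hc1]
      rw [hstep, hstepB, hstepS]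
      apply ih
      intro b hb
      cases stack with
      | nil => simp_all
      | cons x xs =>
        simp only [List.getLast?_cons_cons] at hb
        simp only [List.length_cons, Nat.succ_ne_zero]
        exact h2 b hb
    · by_cases hc2 : c = ']'
      · cases stack with
        | nil =>
          -- stray ']' at depth 0: all three states unchanged
          have hstep : pvStepA s (([] : List Int), out) (i, c) = ([], out) := by
            simp [pvStepA, hc2]
          have hstepB : pvStepB s ((([] : List Int)).length, start,
              ((out.filter (fun p => p.1 == 0)).getLast?).map Prod.snd) (i, c)
              = ((([] : List Int)).length, start,
                 ((out.filter (fun p => p.1 == 0)).getLast?).map Prod.snd) := by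
            simp [pvStepB, hc2]
          have hstepS : pvStepS ((([] : List Int)).length, !out.isEmpty,
              !(out.filter (fun p => p.1 == 0)).isEmpty) c
              = ((([] : List Int)).length, !out.isEmpty,
                 !(out.filter (fun p => p.1 == 0)).isEmpty) := by
            simp [pvStepS, hc2]
          rw [hstep, hstepB, hstepS]
          exact ih [] out start h2
        | cons start' rest =>
          -- pop: A yields (rest.length, s[start'+1:i])
          have hstep : pvStepA s (start' :: rest, out) (i, c)
              = (rest, out ++ [(rest.length, pvContent s start' i)]) := by
            simp [pvStepA, hc2]
          rw [hstep]
          cases rest with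
          | nil =>
            -- depth returns to 0: level-0 yield; stack bottom start' = start
            have hss : start' = start := h2 start' (by simp)
            have hstepB : pvStepB s ((start' :: ([] : List Int)).length, start,
                ((out.filter (fun p => p.1 == 0)).getLast?).map Prod.snd) (i, c)
                = ((([] : List Int)).length, start,
                   (((out ++ [((([] : List Int)).length, pvContent s start' i)]).filter
                      (fun p => p.1 == 0)).getLast?).map Prod.snd) := by
              simp [pvStepB, hc2, hss]
            have hstepS : pvStepS ((start' :: ([] : List Int)).length, !out.isEmpty,
                !(out.filter (fun p => p.1 == 0)).isEmpty) c
                = ((([] : List Int)).length,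
                   !(out ++ [((([] : List Int)).length, pvContent s start' i)]).isEmpty,
                   !((out ++ [((([] : List Int)).length, pvContent s start' i)]).filter
                      (fun p => p.1 == 0)).isEmpty) := by
              simp [pvStepS, hc2]
            rw [hstepB, hstepS]
            apply ih
            intro b hb; simp at hb
          | cons y ys =>
            -- still nested: the new entry has level ≠ 0, nothing at level 0 changes
            have hfilter : (out ++ [((y :: ys).length, pvContent s start' i)]).filter
                (fun p => p.1 == 0) = out.filter (fun p => p.1 == 0) := by
              simp [List.filter_append]
            have hstepB : pvStepB s ((start' :: y :: ys).length, start,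
                ((out.filter (fun p => p.1 == 0)).getLast?).map Prod.snd) (i, c)
                = ((y :: ys).length, start,
                   (((out ++ [((y :: ys).length, pvContent s start' i)]).filter
                      (fun p => p.1 == 0)).getLast?).map Prod.snd) := by
              simp [pvStepB, hc2]
            have hstepS : pvStepS ((start' :: y :: ys).length, !out.isEmpty,
                !(out.filter (fun p => p.1 == 0)).isEmpty) c
                = ((y :: ys).length,
                   !(out ++ [((y :: ys).length, pvContent s start' i)]).isEmpty,
                   !((out ++ [((y :: ys).length, pvContent s start' i)]).filter
                      (fun p => p.1 == 0)).isEmpty) := by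
              simp [pvStepS, hc2]
            rw [hstepB, hstepS]
            apply ih
            intro b hb
            exact h2 b (by rw [List.getLast?_cons_cons]; exact hb)
      · -- any other character: all three states unchanged
        have hstep : pvStepA s (stack, out) (i, c) = (stack, out) := by
          simp [pvStepA, hc1, hc2]
        have hstepB : pvStepB s (stack.length, start,
            ((out.filter (fun p => p.1 == 0)).getLast?).map Prod.snd) (i, c)
            = (stack.length, start,
               ((out.filter (fun p => p.1 == 0)).getLast?).map Prod.snd) := by
          simp [pvStepB, hc1, hc2]
        have hstepS : pvStepS (stack.length, !out.isEmpty,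
            !(out.filter (fun p => p.1 == 0)).isEmpty) c
            = (stack.length, !out.isEmpty,
               !(out.filter (fun p => p.1 == 0)).isEmpty) := by
          simp [pvStepS, hc1, hc2]
        rw [hstep, hstepB, hstepS]
        exact ih stack out start h2

-- The invariant at the real starting states.
theorem pvInv0 (s : String) :
    ((PySem.List.enumerate s.toList).foldl (pvStepB s) (0, 0, none)).2.2
      = ((((PySem.List.enumerate s.toList).foldl (pvStepA s) ([], [])).2.filter
          (fun p => p.1 == 0)).getLast?).map Prod.snd
    ∧ (pvScan s).2
      = (!((PySem.List.enumerate s.toList).foldl (pvStepA s) ([], [])).2.isEmpty,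
         !(((PySem.List.enumerate s.toList).foldl (pvStepA s) ([], [])).2.filter
            (fun p => p.1 == 0)).isEmpty) := by
  have h := pvInv s (PySem.List.enumerate s.toList) [] [] 0 (by intro b hb; simp at hb)
  have hmap : (PySem.List.enumerate s.toList).map Prod.snd = s.toList := by simp [pysem]
  rw [hmap] at h
  simpa [pvScan] using h

theorem pvGet0_head {α : Type} (l : List α) : PySem.List.pyGet? l 0 = l.head? := by
  simp [PySem.List.pyGet?, PySem.List.pyIdx?]; cases l <;> simp

theorem pvMax?_cons_ne_none (a : Nat) (l : List Nat) :
    PySem.List.max? (a :: l) id ≠ none := by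
  simp only [PySem.List.max?]
  induction l generalizing a with
  | nil => simp
  | cons b l ih =>
    simp only [List.foldl_cons]
    split <;> exact ih _

-- ===== VERDICT =====
theorem fasta_to_organism_refseq_spec : Claim_equal_fasta_to_organism_refseq := by
  intro d _hdom hpre
  unfold Spec_fasta_to_organism_refseq
  simp only [fasta_to_organism_refseq, fasta_to_organism_refseq_alt]
  set t := pvTxt d with ht
  by_cases hc : PySem.Str.count t "[" = PySem.Str.count t "]"
  · obtain ⟨hB, hS⟩ := pvInv0 t
    set out := ((PySem.List.enumerate t.toList).foldl (pvStepA t) ([], [])).2 with hout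
    have hpb : pvParseBrackets t = out := by
      rw [pvParseBrackets, if_neg (by simpa using hc)]
    rw [hpb]
    simp only [if_pos hc]
    by_cases hoe : out = []
    · -- no matched pair at all: both fall back
      rw [hoe] at hB ⊢
      simp only [List.filter_nil, List.getLast?_nil, Option.map_none] at hB
      simp [hB]
    · -- out ≠ []: Pre_ forces a level-0 yield
      have hany : (pvScan t).2.1 = true := by
        rw [hS]; simpa using hoe
      have htop : (pvScan t).2.2 = true := by
        rcases hpre with h | h | h
        · exact absurd hc h
        · rw [← ht] at h; rw [hany] at h; cases h
        · rwa [← ht] at h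
      have hfne : out.filter (fun p => p.1 == 0) ≠ [] := by
        rw [hS] at htop; simpa using htop
      obtain ⟨p, hp⟩ := Option.isSome_iff_exists.mp (by
        rw [List.getLast?_isSome]; exact hfne)
      rw [hp] at hB
      have hp0 : p.1 = 0 := by
        have := List.of_mem_filter (List.mem_of_getLast? hp)
        simpa using this
      -- B returns some p.2
      rw [hB]
      -- A side
      rw [if_neg (by simpa using hoe)]
      by_cases hmax : (PySem.List.max? (out.map Prod.fst) id).getD 0 > 0
      · rw [if_pos hmax]
        set org := (out.filter (fun p => p.1 == 0)).map Prod.snd with horg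
        have horgl : org.getLast? = some p.2 := by
          rw [horg, List.getLast?_map, hp]; rfl
        by_cases hlen : org.length > 1
        · rw [if_pos hlen, PySem.List.pyGet?_neg_one, horgl]; rfl
        · rw [if_neg hlen]
          have : org ≠ [] := by
            intro h; rw [h] at horgl; simp at horgl
          have h1 : org.length = 1 := by
            have := List.length_pos_iff.mpr this; omega
          obtain ⟨x, hx⟩ := List.length_eq_one_iff.mp h1
          rw [hx] at horgl ⊢
          have hxp : x = p.2 := by simpa using horgl
          rw [pvGet0_head]
          exact congrArg some hxp
      · rw [if_neg hmax]
        -- max level = 0: every level is 0, so the filter keeps everything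
        have hall : ∀ q ∈ out, q.1 = 0 := by
          intro q hq
          obtain ⟨m, hm⟩ := Option.isSome_iff_exists.mp
            (show (PySem.List.max? (out.map Prod.fst) id).isSome by
            cases houtc : out with
            | nil => exact absurd houtc hoe
            | cons a l =>
              rw [List.map_cons]
              exact Option.isSome_iff_ne_none.mpr (pvMax?_cons_ne_none _ _))
          have hm0 : m = 0 := by
            rw [hm] at hmax; simpa using Nat.eq_zero_of_not_pos hmax
          have := PySem.List.max?_isMax hm (q.1) (List.mem_map.mpr ⟨q, hq, rfl⟩)
          simp only [id, hm0] at this; omega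
        have hfe : out.filter (fun p => p.1 == 0) = out :=
          List.filter_eq_self.mpr (fun a ha => by simpa using hall a ha)
        rw [hfe] at hp
        rw [PySem.List.pyGet?_neg_one, hp]; rfl
  · -- bracket counts differ: A's brackets is [], B skips the scan; both fall back
    have hpb : pvParseBrackets t = [] := by
      rw [pvParseBrackets, if_pos (by simpa using hc)]
    rw [hpb, if_neg hc]
    simp

def fasta_to_organism_refseq_raises : Claim_raises_fasta_to_organism_refseq := by
  unfold Claim_raises_fasta_to_organism_refseq
  constructor
  · intro d _hdom hr
    unfold Raises_fasta_to_organism_refseq at hr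
    unfold Pre_fasta_to_organism_refseq
    rintro (h | h | h)
    · exact h hr.1
    · rw [hr.2.1] at h; cases h
    · rw [hr.2.2] at h; cases h
  · exact ⟨by decide, by decide, by decide⟩
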